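-- pv_equiv track=rewrite | github.com/MiquelRoca18/tennis-ml-predictor | src/services/match_update_service.py | _api_first_is_our_jugador1
-- ===== SOURCE A (Python) =====
-- from typing import Dict, List, Optional
--
-- def _api_first_is_our_jugador1(api_match: Dict, db_match: Dict) -> bool:
--     """True si API first/home corresponde a nuestro jugador1 (para no intercambiar scores)."""
--     api_first = (api_match.get("event_first_player") or api_match.get("event_home_team") or "").strip()
--     if not api_first:
--         return True
--     j1 = (db_match.get("jugador1_nombre") or db_match.get("jugador1") or "").strip()
--     if not j1:
--         return True
--     api_first_norm = api_first.lower().replace("-", " ").split()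
--     j1_norm = j1.lower().replace("-", " ").split()
--     if api_first_norm and j1_norm:
--         if api_first_norm[-1] == j1_norm[-1]:
--             return True
--         if any(a in j1_norm for a in api_first_norm) or any(a in api_first_norm for a in j1_norm):
--             return True
--     return False
-- ===== SOURCE B (Python) =====
-- def _api_first_is_our_jugador1(api_match, db_match):
--     """True si API first/home corresponde a nuestro jugador1 (para no intercambiar scores)."""
--     api_first = (api_match.get("event_first_player") or api_match.get("event_home_team") or "").strip()
--     if not api_first:
--         return True
--     j1 = (db_match.get("jugador1_nombre") or db_match.get("jugador1") or "").strip()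
--     if not j1:
--         return True
--     xs = sorted(api_first.lower().replace("-", " ").split())
--     ys = sorted(j1.lower().replace("-", " ").split())
--     i = j = 0
--     while i < len(xs) and j < len(ys):
--         if xs[i] == ys[j]:
--             return True
--         if xs[i] < ys[j]:
--             i += 1
--         else:
--             j += 1
--     return False
-- ===== Notes on version B (the rewrite author's own statement) =====
-- stated objective: alternative
-- what changed: A's three-branch decision (last-token equality plus two directional any-in membership scans) is replaced by sorting both normalized token lists and detecting a shared token with a single two-pointer merge scan; both compute whether the token lists share a token.
import Mathlib
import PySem

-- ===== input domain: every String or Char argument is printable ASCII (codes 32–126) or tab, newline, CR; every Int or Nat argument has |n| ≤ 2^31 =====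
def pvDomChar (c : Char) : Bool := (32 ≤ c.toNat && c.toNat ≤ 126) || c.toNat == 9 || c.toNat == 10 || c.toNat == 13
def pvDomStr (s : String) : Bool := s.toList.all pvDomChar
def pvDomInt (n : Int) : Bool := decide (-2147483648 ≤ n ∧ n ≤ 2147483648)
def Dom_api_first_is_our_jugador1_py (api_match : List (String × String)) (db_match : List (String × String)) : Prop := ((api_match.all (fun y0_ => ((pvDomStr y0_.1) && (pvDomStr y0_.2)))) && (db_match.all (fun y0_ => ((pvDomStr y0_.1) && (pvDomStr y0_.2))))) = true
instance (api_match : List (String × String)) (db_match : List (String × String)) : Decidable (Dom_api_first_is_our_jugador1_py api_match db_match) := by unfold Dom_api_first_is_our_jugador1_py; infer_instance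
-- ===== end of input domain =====

-- B replaces A's three-branch decision (last-token equality plus two directional any-in scans)
-- by sorting both normalized token lists and scanning them with a two-pointer merge for a shared token.


-- ===== PORT A =====
-- Python 'x or y' over Optional[str]: None and "" are falsy
def pvOrElse (a : Option String) (b : String) : String :=
  match a with
  | some s => if s.toList.isEmpty then b else s
  | none => b

-- s.lower().replace("-", " ").split()
def pvNorm (s : String) : List String :=
  PySem.Str.split₀ (PySem.Str.replace (PySem.Str.lower s) "-" " ")

def api_first_is_our_jugador1_py (api_match : List (String × String)) (db_match : List (String × String)) : Bool :=
  let apiD := PySem.Dict.ofList api_match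
  let dbD := PySem.Dict.ofList db_match
  let api_first := PySem.Str.strip (pvOrElse (apiD.get? "event_first_player") (pvOrElse (apiD.get? "event_home_team") ""))
  if api_first.toList.isEmpty then true
  else
    let j1 := PySem.Str.strip (pvOrElse (dbD.get? "jugador1_nombre") (pvOrElse (dbD.get? "jugador1") ""))
    if j1.toList.isEmpty then true
    else
      let api_first_norm := pvNorm api_first
      let j1_norm := pvNorm j1
      if !api_first_norm.isEmpty && !j1_norm.isEmpty then
        if PySem.List.pyGetD api_first_norm (-1) "" == PySem.List.pyGetD j1_norm (-1) "" then true
        else if api_first_norm.any (fun a => j1_norm.contains a) || j1_norm.any (fun a => api_first_norm.contains a) then true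
        else false
      else false

-- ===== PORT B =====
-- the two-pointer merge scan over the two sorted token lists (B's while loop)
def pvMergeScan : List String → List String → Bool
  | x :: xs, y :: ys =>
    if x == y then true
    else if x < y then pvMergeScan xs (y :: ys)
    else pvMergeScan (x :: xs) ys
  | _, _ => false
  termination_by xs ys => xs.length + ys.length

def api_first_is_our_jugador1_py_alt (api_match : List (String × String)) (db_match : List (String × String)) : Bool :=
  let apiD := PySem.Dict.ofList api_match
  let dbD := PySem.Dict.ofList db_match
  let api_first := PySem.Str.strip (pvOrElse (apiD.get? "event_first_player") (pvOrElse (apiD.get? "event_home_team") ""))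
  if api_first.toList.isEmpty then true
  else
    let j1 := PySem.Str.strip (pvOrElse (dbD.get? "jugador1_nombre") (pvOrElse (dbD.get? "jugador1") ""))
    if j1.toList.isEmpty then true
    else
      pvMergeScan (PySem.List.sorted (pvNorm api_first) (fun x => x) false)
                  (PySem.List.sorted (pvNorm j1) (fun x => x) false)

-- ===== PRECONDITION & SPEC =====
def Spec_api_first_is_our_jugador1_py (api_match : List (String × String)) (db_match : List (String × String)) (out : Bool) : Prop := out = api_first_is_our_jugador1_py_alt api_match db_match
instance (api_match : List (String × String)) (db_match : List (String × String)) (out : Bool) : Decidable (Spec_api_first_is_our_jugador1_py api_match db_match out) := by unfold Spec_api_first_is_our_jugador1_py; infer_instance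

-- ===== CLAIM (what is proved, stated in full; the proofs are below) =====
def Claim_equal_api_first_is_our_jugador1_py : Prop := ∀ (api_match : List (String × String)) (db_match : List (String × String)), Dom_api_first_is_our_jugador1_py api_match db_match → Spec_api_first_is_our_jugador1_py api_match db_match (api_first_is_our_jugador1_py api_match db_match)

-- ===== LEMMAS AND PROOFS =====

-- on sorted lists the merge scan decides "the lists share an element"
lemma pv_mergeScan_iff (xs ys : List String)
    (hx : xs.Pairwise (· ≤ ·)) (hy : ys.Pairwise (· ≤ ·)) :
    pvMergeScan xs ys = true ↔ ∃ a, a ∈ xs ∧ a ∈ ys := by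
  induction xs, ys using pvMergeScan.induct with
  | case1 x xs y ys heq =>
    have : x = y := eq_of_beq heq
    subst this
    simp [pvMergeScan]
  | case2 x xs y ys hne hlt ih =>
    rw [show pvMergeScan (x :: xs) (y :: ys) = pvMergeScan xs (y :: ys) by
      simp [pvMergeScan, hne, hlt]]
    rw [ih (List.Pairwise.of_cons hx) hy]
    constructor
    · rintro ⟨a, ha1, ha2⟩; exact ⟨a, by simp [ha1], ha2⟩
    · rintro ⟨a, ha1, ha2⟩
      rcases List.mem_cons.mp ha1 with rfl | ha1
      · exfalso
        rcases List.mem_cons.mp ha2 with rfl | ha2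
        · exact lt_irrefl _ hlt
        · exact lt_irrefl _ (lt_of_lt_of_le hlt ((List.pairwise_cons.mp hy).1 _ ha2))
      · exact ⟨a, ha1, ha2⟩
  | case3 x xs y ys hne hge ih =>
    have h2 : x ≠ y := by intro h; exact hne (by simp [h])
    have hylt : y < x := (not_lt.mp hge).lt_of_ne (Ne.symm h2)
    rw [show pvMergeScan (x :: xs) (y :: ys) = pvMergeScan (x :: xs) ys by
      simp [pvMergeScan, hne, hge]]
    rw [ih hx (List.Pairwise.of_cons hy)]
    constructor
    · rintro ⟨a, ha1, ha2⟩; exact ⟨a, ha1, by simp [ha2]⟩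
    · rintro ⟨a, ha1, ha2⟩
      rcases List.mem_cons.mp ha2 with rfl | ha2
      · exfalso
        rcases List.mem_cons.mp ha1 with rfl | ha1
        · exact lt_irrefl _ hylt
        · exact lt_irrefl _ (lt_of_lt_of_le hylt ((List.pairwise_cons.mp hx).1 _ ha1))
      · exact ⟨a, ha1, ha2⟩
  | case4 xs ys h =>
    constructor
    · intro hc
      exfalso
      rcases xs with _ | ⟨x, xs⟩
      · simp [pvMergeScan] at hc
      · rcases ys with _ | ⟨y, ys⟩
        · simp [pvMergeScan] at hc
        · exact h x xs y ys rfl rfl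
    · rintro ⟨a, ha1, ha2⟩
      rcases xs with _ | ⟨x, xs⟩
      · simp at ha1
      · rcases ys with _ | ⟨y, ys⟩
        · simp at ha2
        · exact absurd (h x xs y ys rfl rfl) not_false

-- A's three-branch tail equals B's sort-and-merge-scan tail
lemma pv_tail_eq (an jn : List String) :
    (if !an.isEmpty && !jn.isEmpty then
        if PySem.List.pyGetD an (-1) "" == PySem.List.pyGetD jn (-1) "" then true
        else if an.any (fun a => jn.contains a) || jn.any (fun a => an.contains a) then true
        else false
      else false)
    = pvMergeScan (PySem.List.sorted an (fun x => x) false) (PySem.List.sorted jn (fun x => x) false) := by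
  apply Bool.eq_iff_iff.mpr
  rw [pv_mergeScan_iff _ _ (PySem.List.sorted_pairwise an (fun x => x)) (PySem.List.sorted_pairwise jn (fun x => x))]
  simp only [PySem.List.mem_sorted]
  constructor
  · intro h
    split at h
    · rename_i hne
      simp only [Bool.and_eq_true, Bool.not_eq_true', List.isEmpty_eq_false_iff] at hne
      obtain ⟨han, hjn⟩ := hne
      split at h
      · rename_i hlast
        rw [PySem.List.pyGetD_neg_one (h := han), PySem.List.pyGetD_neg_one (h := hjn)] at hlast
        have heq : an.getLast han = jn.getLast hjn := by exact_mod_cast (beq_iff_eq.mp hlast)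
        exact ⟨an.getLast han, List.getLast_mem han, heq ▸ List.getLast_mem hjn⟩
      · split at h
        · rename_i hany
          rcases Bool.or_eq_true_iff.mp hany with h1 | h1 <;>
            obtain ⟨x, hx1, hx2⟩ := List.any_eq_true.mp h1
          · exact ⟨x, hx1, List.contains_iff_mem.mp hx2⟩
          · exact ⟨x, List.contains_iff_mem.mp hx2, hx1⟩
        · exact absurd h (by simp)
    · exact absurd h (by simp)
  · rintro ⟨x, hx1, hx2⟩
    have han : an ≠ [] := by rintro rfl; simp at hx1
    have hjn : jn ≠ [] := by rintro rfl; simp at hx2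
    rw [if_pos (by simp [List.isEmpty_eq_false_iff, han, hjn])]
    split
    · rfl
    · rw [if_pos]
      apply Bool.or_eq_true_iff.mpr
      exact Or.inl (List.any_eq_true.mpr ⟨x, hx1, List.contains_iff_mem.mpr hx2⟩)

-- ===== VERDICT (by name: the statement is the Claim_ definition above) =====
theorem api_first_is_our_jugador1_py_spec : Claim_equal_api_first_is_our_jugador1_py := by
  intro api_match db_match _
  unfold Spec_api_first_is_our_jugador1_py api_first_is_our_jugador1_py api_first_is_our_jugador1_py_alt
  simp only []
  split
  · rfl
  · split
    · rfl
    · exact pv_tail_eq _ _
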